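-- pv_equiv track=rewrite | github.com/saipavanavasarala/eobProject | bcbs/master.py | insert_none_and_combine_in_range
-- ===== SOURCE A (Python) =====
-- def insert_none_and_combine_in_range(lst, start, end):
--     result = lst[:start]
--     temp = []
--
--     def add_temp_to_result():
--         if temp:
--             result.append(', '.join(temp))
--             temp.clear()
--
--     for i in range(start, end):
--         if '.' in lst[i]:
--             add_temp_to_result()
--             if result and '.' in result[-1]:
--                 result.append(None)
--             result.append(lst[i])
--         else:
--             temp.append(lst[i])
--
--     # Add any remaining values in temp to result
--     add_temp_to_result()
--
--     result.extend(lst[end:])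
--     return result
-- ===== SOURCE B (Python) =====
-- def split_run(items, i):
--     # first index j >= i with '.' in items[j] (or len(items)): the dot-free run is items[i:j]
--     j = i
--     while j < len(items) and '.' not in items[j]:
--         j += 1
--     return j
--
--
-- def group_pieces(items):
--     # collapse each maximal run of dot-free items into one ', '-joined string;
--     # keep each dot item as its own element
--     pieces = []
--     i = 0
--     while i < len(items):
--         if '.' in items[i]:
--             pieces.append(items[i])
--             i += 1
--         else:
--             j = split_run(items, i)
--             pieces.append(', '.join(items[i:j]))
--             i = j
--     return pieces
--
--
-- def insert_none_and_combine_in_range(lst, start, end):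
--     middle = [lst[i] for i in range(start, end)]
--     result = lst[:start]
--     for e in group_pieces(middle):
--         if '.' in e and result and '.' in result[-1]:
--             result.append(None)
--         result.append(e)
--     result.extend(lst[end:])
--     return result
-- ===== Notes on version B (the rewrite author's own statement) =====
-- stated objective: alternative
-- what changed: A's single fused pass with a temp accumulator and an in-loop flush is split into two phases: a group-collapse scan (each maximal dot-free run of lst[start:end] becomes one ', '-joined string via an index-based run finder) followed by a separate linear None-insertion pass over the collapsed pieces.
import Mathlib
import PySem

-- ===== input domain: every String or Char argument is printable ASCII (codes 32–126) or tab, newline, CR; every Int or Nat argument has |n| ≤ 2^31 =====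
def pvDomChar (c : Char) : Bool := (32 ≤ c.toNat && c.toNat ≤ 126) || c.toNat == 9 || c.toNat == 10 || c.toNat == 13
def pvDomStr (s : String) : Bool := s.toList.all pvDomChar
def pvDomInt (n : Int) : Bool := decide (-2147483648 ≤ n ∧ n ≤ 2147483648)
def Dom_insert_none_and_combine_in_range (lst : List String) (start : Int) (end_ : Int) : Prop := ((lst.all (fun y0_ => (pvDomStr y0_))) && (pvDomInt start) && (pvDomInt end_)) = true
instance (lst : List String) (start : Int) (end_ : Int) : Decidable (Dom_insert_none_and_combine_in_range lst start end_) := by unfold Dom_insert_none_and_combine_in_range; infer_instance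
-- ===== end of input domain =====

-- B replaces A's fused accumulator pass by a group-collapse phase followed by a separate
-- None-insertion pass (objective: alternative decomposition, same asymptotic cost).

-- shared primitive helpers ('.' in s, and "result and '.' in result[-1]")
def hasDot (s : String) : Bool := PySem.Str.isIn "." s
def lastHasDot (res : List (Option String)) : Bool :=
  match res.getLast? with
  | some (some s) => hasDot s
  | _ => false
  -- the 'some none' case is unreachable in both programs: a None is always immediately
  -- followed by a dot item, so result[-1] is a string whenever it is inspected

-- ===== PORT A =====
-- add_temp_to_result
def addTempA (res : List (Option String)) (temp : List String) :
    List (Option String) × List String :=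
  if temp.isEmpty then (res, temp) else (res ++ [some (PySem.Str.join ", " temp)], [])

-- A's loop body, on the element lst[i]
def stepA (st : List (Option String) × List String) (x : String) :
    List (Option String) × List String :=
  if hasDot x then
    let p := addTempA st.1 st.2
    let res2 := if !p.1.isEmpty && lastHasDot p.1 then p.1 ++ [none] else p.1
    (res2 ++ [some x], p.2)
  else (st.1, st.2 ++ [x])

def insert_none_and_combine_in_range (lst : List String) (start : Int) (end_ : Int) :
    List (Option String) :=
  let init := (PySem.List.slice lst none (some start)).map some   -- result = lst[:start]
  let st := (PySem.List.pyRange start end_ 1).foldl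
      (fun st i => stepA st ((PySem.List.pyGet? lst i).getD "")) (init, [])
      -- Pre_ guarantees every i is an in-range index, so the "" default is never used
  (addTempA st.1 st.2).1 ++ (PySem.List.slice lst (some end_) none).map some

-- ===== PORT B =====
-- Source B's index loops over the remaining suffix items[i:] are ported as structural
-- recursion on that suffix; split_run's index j is represented by the (run, remainder)
-- split of the suffix it induces (run = items[i:j], remainder = items[j:]).
def splitRunB : List String → List String × List String
  | [] => ([], [])
  | x :: xs =>
    if hasDot x then ([], x :: xs)
    else
      let p := splitRunB xs
      (x :: p.1, p.2)

-- termination fact cited by groupPiecesB (the remainder never grows)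
theorem splitRunB_rest_length : ∀ xs : List String, (splitRunB xs).2.length ≤ xs.length := by
  intro xs
  induction xs with
  | nil => simp [splitRunB]
  | cons x xs ih =>
    simp only [splitRunB]
    split
    · simp
    · simpa using Nat.le_succ_of_le ih

-- group_pieces
def groupPiecesB : List String → List String
  | [] => []
  | x :: xs =>
    if hasDot x then x :: groupPiecesB xs
    else
      PySem.Str.join ", " (splitRunB (x :: xs)).1 :: groupPiecesB (splitRunB (x :: xs)).2
termination_by xs => xs.length
decreasing_by
  · simp
  · simp only [splitRunB, *]
    exact Nat.lt_succ_of_le (splitRunB_rest_length xs)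

-- the None-insertion pass over the collapsed pieces
def passB (res : List (Option String)) (pieces : List String) : List (Option String) :=
  pieces.foldl
    (fun res e =>
      (if hasDot e && !res.isEmpty && lastHasDot res then res ++ [none] else res) ++ [some e])
    res

def insert_none_and_combine_in_range_alt (lst : List String) (start : Int) (end_ : Int) :
    List (Option String) :=
  let middle := (PySem.List.pyRange start end_ 1).map
      (fun i => (PySem.List.pyGet? lst i).getD "")   -- [lst[i] for i in range(start, end)]
  passB ((PySem.List.slice lst none (some start)).map some) (groupPiecesB middle)
    ++ (PySem.List.slice lst (some end_) none).map some

-- ===== PRECONDITION & SPEC =====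
-- A raises IndexError iff some i in range(start, end) is an out-of-range index of lst;
-- Pre_ is exactly the inputs on which A returns (negative in-range indices wrap and are admitted).
def Pre_insert_none_and_combine_in_range (lst : List String) (start : Int) (end_ : Int) : Prop :=
  end_ ≤ start ∨ (-(lst.length : Int) ≤ start ∧ end_ ≤ (lst.length : Int))
instance (lst : List String) (start : Int) (end_ : Int) : Decidable (Pre_insert_none_and_combine_in_range lst start end_) := by unfold Pre_insert_none_and_combine_in_range; infer_instance

def pvWitness_insert_none_and_combine_in_range : List String × Int × Int :=
  (["a", "b", "x.y", "p.q", "c"], 1, 4)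

def Spec_insert_none_and_combine_in_range (lst : List String) (start : Int) (end_ : Int) (out : List (Option String)) : Prop := out = insert_none_and_combine_in_range_alt lst start end_
instance (lst : List String) (start : Int) (end_ : Int) (out : List (Option String)) : Decidable (Spec_insert_none_and_combine_in_range lst start end_ out) := by unfold Spec_insert_none_and_combine_in_range; infer_instance

-- ===== CLAIM (what is proved, stated in full; the proofs are below) =====
def Claim_equal_insert_none_and_combine_in_range : Prop := ∀ (lst : List String) (start : Int) (end_ : Int), Dom_insert_none_and_combine_in_range lst start end_ → Pre_insert_none_and_combine_in_range lst start end_ → Spec_insert_none_and_combine_in_range lst start end_ (insert_none_and_combine_in_range lst start end_)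

-- ===== LEMMAS AND PROOFS =====

theorem singleton_infix_iff {α : Type} (a : α) (l : List α) : [a] <:+: l ↔ a ∈ l := by
  constructor
  · intro h; exact h.subset (by simp)
  · intro h
    obtain ⟨s, t, rfl⟩ := List.append_of_mem h
    exact ⟨s, t, by simp⟩

theorem hasDot_iff (s : String) : hasDot s = true ↔ '.' ∈ s.toList := by
  rw [hasDot, PySem.Str.isIn_iff_infix]
  exact singleton_infix_iff '.' s.toList

theorem mem_join_chars (ls : List (List Char)) (h : ∀ cs ∈ ls, '.' ∉ cs) :
    '.' ∉ PySem.Chars.join [',', ' '] ls := by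
  induction ls with
  | nil => simp [PySem.Chars.join_nil]
  | cons a rest ih =>
    cases rest with
    | nil => simpa [PySem.Chars.join_singleton] using h a (by simp)
    | cons b r =>
      rw [PySem.Chars.join_cons_cons]
      intro hm
      rcases List.mem_append.1 hm with hm | hm
      · rcases List.mem_append.1 hm with hm | hm
        · exact h a (by simp) hm
        · simp at hm
      · exact ih (fun cs hc => h cs (by simp [hc])) hm

theorem hasDot_join (xs : List String) (h : ∀ x ∈ xs, hasDot x = false) :
    hasDot (PySem.Str.join ", " xs) = false := by
  rw [Bool.eq_false_iff]
  intro hc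
  rw [hasDot_iff] at hc
  rw [PySem.Str.toList_join] at hc
  refine mem_join_chars (xs.map String.toList) ?_ (by simpa using hc)
  intro cs hcs
  simp at hcs
  obtain ⟨x, hx, rfl⟩ := hcs
  have := h x hx
  rw [Bool.eq_false_iff] at this
  intro hm; exact this ((hasDot_iff x).2 hm)

theorem splitRunB_all_nondot (xs : List String) (h : ∀ x ∈ xs, hasDot x = false) :
    splitRunB xs = (xs, []) := by
  induction xs with
  | nil => rfl
  | cons x xs ih =>
    simp only [splitRunB, h x (by simp)]
    simp [ih (fun y hy => h y (by simp [hy]))]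

theorem splitRunB_append_dot (temp : List String) (y : String) (r : List String)
    (h : ∀ x ∈ temp, hasDot x = false) (hy : hasDot y = true) :
    splitRunB (temp ++ y :: r) = (temp, y :: r) := by
  induction temp with
  | nil => simp [splitRunB, hy]
  | cons t ts ih =>
    simp only [List.cons_append, splitRunB, h t (by simp)]
    simp [ih (fun x hx => h x (by simp [hx]))]

-- groupPieces of a nonempty all-dot-free list is the single joined string
theorem groupPiecesB_nondot (t : String) (ts : List String)
    (h : ∀ x ∈ t :: ts, hasDot x = false) :
    groupPiecesB (t :: ts) = [PySem.Str.join ", " (t :: ts)] := by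
  rw [groupPiecesB]
  rw [if_neg (by simp [h t (by simp)])]
  rw [splitRunB_all_nondot _ h]
  simp [groupPiecesB]

-- groupPieces with a pending dot-free run followed by a dot item
theorem groupPiecesB_pending_dot (temp : List String) (y : String) (r : List String)
    (h : ∀ x ∈ temp, hasDot x = false) (hy : hasDot y = true) (hne : temp ≠ []) :
    groupPiecesB (temp ++ y :: r) = PySem.Str.join ", " temp :: y :: groupPiecesB r := by
  obtain ⟨t, ts, rfl⟩ := List.exists_cons_of_ne_nil hne
  rw [List.cons_append, groupPiecesB]
  rw [if_neg (by simp [h t (by simp)])]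
  rw [← List.cons_append, splitRunB_append_dot _ _ _ h hy]
  rw [groupPiecesB, if_pos hy]

-- the loop invariant: A's fused loop from state (res, temp) equals B's second pass over
-- the collapsed pieces of temp ++ M, for any dot-free pending run temp
theorem main_lemma : ∀ (M : List String) (res : List (Option String)) (temp : List String),
    (∀ x ∈ temp, hasDot x = false) →
    (addTempA (M.foldl stepA (res, temp)).1 (M.foldl stepA (res, temp)).2).1 =
      passB res (groupPiecesB (temp ++ M)) := by
  intro M
  induction M with
  | nil =>
    intro res temp h
    simp only [List.foldl_nil, List.append_nil]
    cases temp with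
    | nil => simp [addTempA, groupPiecesB, passB]
    | cons t ts =>
      rw [groupPiecesB_nondot t ts h]
      simp [addTempA, passB, hasDot_join _ h]
  | cons x M' ih =>
    intro res temp h
    by_cases hx : hasDot x = true
    · -- dot item: A flushes temp and maybe inserts None; B sees the joined run then x
      rw [List.foldl_cons]
      have hstep : stepA (res, temp) x =
          ((if !(addTempA res temp).1.isEmpty && lastHasDot (addTempA res temp).1
              then (addTempA res temp).1 ++ [none] else (addTempA res temp).1) ++ [some x],
            (addTempA res temp).2) := by
        simp [stepA, hx]
      rw [hstep]
      cases temp with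
      | nil =>
        have h2 : (addTempA res ([] : List String)) = (res, []) := by simp [addTempA]
        rw [h2]
        rw [ih _ [] (by simp)]
        simp only [List.nil_append]
        rw [groupPiecesB, if_pos hx]
        simp [passB, hx]
      | cons t ts =>
        have h2 : addTempA res (t :: ts) = (res ++ [some (PySem.Str.join ", " (t :: ts))], []) := by
          simp [addTempA]
        rw [h2]
        rw [ih _ [] (by simp)]
        rw [groupPiecesB_pending_dot _ _ _ h hx (by simp)]
        simp only [passB, List.foldl_cons]
        rw [hasDot_join _ h]
        have hlast : lastHasDot (res ++ [some (PySem.Str.join ", " (t :: ts))]) = false := by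
          simp [lastHasDot, List.getLast?_append, hasDot_join _ h]
        simp [hx, hlast]
    · -- dot-free item: A extends temp; B's pending run grows
      rw [List.foldl_cons]
      have hstep : stepA (res, temp) x = (res, temp ++ [x]) := by simp [stepA, hx]
      rw [hstep]
      rw [ih res (temp ++ [x]) (by
        intro z hz
        rcases List.mem_append.1 hz with hz | hz
        · exact h z hz
        · simp at hz; subst hz; simpa using hx)]
      rw [List.append_assoc]
      simp

-- ===== VERDICT (by name: the statement is the Claim_ definition above) =====
theorem insert_none_and_combine_in_range_spec : Claim_equal_insert_none_and_combine_in_range := by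
  intro lst start end_ _ _
  unfold Spec_insert_none_and_combine_in_range
  unfold insert_none_and_combine_in_range insert_none_and_combine_in_range_alt
  have hmap := List.foldl_map (f := fun i => (PySem.List.pyGet? lst i).getD "")
    (g := stepA) (l := PySem.List.pyRange start end_ 1)
    (init := ((PySem.List.slice lst none (some start)).map some, ([] : List String)))
  simp only [← hmap]
  rw [main_lemma _ _ [] (by simp)]
  simp
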